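-- pv_equiv track=rewrite | github.com/Rashad-lab/Gene-level-frameshifting | Frameshift location and impact/frameshift_loci.py | first_offframe_run
-- ===== SOURCE A (Python) =====
-- def first_offframe_run(states, min_persist=6):
--     """Find first run where state != 0 with length >= min_persist."""
--     T = len(states)
--     i = 0
--     while i < T:
--         if states[i] == 0:
--             i += 1; continue
--         s = states[i]
--         j = i
--         while j+1 < T and states[j+1] == s:
--             j += 1
--         if (j - i + 1) >= min_persist:
--             return (i, j, s)
--         i = j + 1
--     return None
-- ===== SOURCE B (Python) =====
-- def first_offframe_run(states, min_persist=6):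
--     """Single forward pass tracking the current run of equal values (no inner rescan)."""
--     prev = None
--     start = 0
--     run = 0
--     for idx, v in enumerate(states):
--         if prev == v:
--             run += 1
--         else:
--             if prev is not None and prev != 0 and run >= min_persist:
--                 return (start, start + run - 1, prev)
--             prev, start, run = v, idx, 1
--     if prev is not None and prev != 0 and run >= min_persist:
--         return (start, start + run - 1, prev)
--     return None
-- ===== Notes on version B (the rewrite author's own statement) =====
-- stated objective: alternative
-- what changed: Replaces A's outer index loop with a nested inner rescan (while j+1 < T and states[j+1] == s) by a single forward pass over enumerate(states) that maintains the current run's value, start index and length, flushing the run check whenever the value changes and once after the loop.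
import Mathlib
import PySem

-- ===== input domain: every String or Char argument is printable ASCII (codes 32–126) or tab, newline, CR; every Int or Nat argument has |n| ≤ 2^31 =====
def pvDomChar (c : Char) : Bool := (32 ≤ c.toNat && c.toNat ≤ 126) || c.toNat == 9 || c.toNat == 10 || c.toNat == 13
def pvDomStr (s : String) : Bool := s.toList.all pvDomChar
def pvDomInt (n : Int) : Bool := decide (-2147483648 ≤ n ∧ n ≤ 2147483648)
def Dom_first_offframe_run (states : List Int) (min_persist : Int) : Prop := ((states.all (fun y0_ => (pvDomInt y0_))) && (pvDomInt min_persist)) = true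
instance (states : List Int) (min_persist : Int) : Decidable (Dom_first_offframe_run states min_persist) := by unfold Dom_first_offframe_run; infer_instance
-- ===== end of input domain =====

-- B replaces A's nested index scan by one forward pass that tracks the current run
-- (value, start, length); same return value, an alternative decomposition.

-- ===== PORT A =====
-- inner 'while j+1 < T and states[j+1] == s: j += 1' of A
def runEndA (states : List Int) (s : Int) (j : Nat) : Nat :=
  if h : j + 1 < states.length ∧ states.getD (j+1) 0 = s then runEndA states s (j+1) else j
termination_by states.length - j
decreasing_by omega

theorem runEndA_ge (states : List Int) (s : Int) (j : Nat) : j ≤ runEndA states s j := by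
  fun_induction runEndA with
  | case1 j h ih => omega
  | case2 => omega

-- outer 'while i < T' of A
def outerA (states : List Int) (min_persist : Int) (i : Nat) : Option (Int × Int × Int) :=
  if h : i < states.length then
    let s := states.getD i 0
    if s = 0 then outerA states min_persist (i+1)
    else
      let j := runEndA states s i
      if min_persist ≤ (j : Int) - (i : Int) + 1 then some ((i : Int), (j : Int), s)
      else outerA states min_persist (j+1)
  else none
termination_by states.length - i
decreasing_by
  · omega
  · have := runEndA_ge states (states.getD i 0) i; omega

def first_offframe_run (states : List Int) (min_persist : Int) : Option (Int × Int × Int) :=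
  outerA states min_persist 0

-- ===== PORT B =====
-- the post-loop (and in-loop) flush check of B
def flushB (min_persist : Int) (prev : Option Int) (start run : Int) : Option (Int × Int × Int) :=
  match prev with
  | some p => if p ≠ 0 ∧ min_persist ≤ run then some (start, start + run - 1, p) else none
  | none => none

-- B's single 'for idx, v in enumerate(states)' pass
def goB (states : List Int) (min_persist : Int) (idx : Nat) (prev : Option Int) (start run : Int) :
    Option (Int × Int × Int) :=
  if _h : idx < states.length then
    let v := states.getD idx 0
    if prev = some v then goB states min_persist (idx+1) prev start (run+1)
    else
      match flushB min_persist prev start run with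
      | some r => some r
      | none => goB states min_persist (idx+1) (some v) (idx : Int) 1
  else flushB min_persist prev start run
termination_by states.length - idx
decreasing_by all_goals omega

def first_offframe_run_alt (states : List Int) (min_persist : Int) : Option (Int × Int × Int) :=
  goB states min_persist 0 none 0 0

-- ===== PRECONDITION & SPEC =====
def Spec_first_offframe_run (states : List Int) (min_persist : Int) (out : Option (Int × Int × Int)) : Prop := out = first_offframe_run_alt states min_persist
instance (states : List Int) (min_persist : Int) (out : Option (Int × Int × Int)) : Decidable (Spec_first_offframe_run states min_persist out) := by unfold Spec_first_offframe_run; infer_instance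

-- ===== CLAIM (what is proved, stated in full; the proofs are below) =====
def Claim_equal_first_offframe_run : Prop := ∀ (states : List Int) (min_persist : Int), Dom_first_offframe_run states min_persist → Spec_first_offframe_run states min_persist (first_offframe_run states min_persist)

-- ===== LEMMAS AND PROOFS =====

-- runEndA reaches exactly the last index of the maximal run ending before e
theorem runEndA_eq (states : List Int) (p : Int) (e : Nat)
    (he : e ≤ states.length)
    (hend : e = states.length ∨ states.getD e 0 ≠ p) :
    ∀ j, j < e → (∀ k, j < k → k < e → states.getD k 0 = p) →
    runEndA states p j = e - 1 := by
  intro j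
  fun_induction runEndA states p j with
  | case1 j h ih =>
    intro hj hall
    by_cases hje : j + 1 = e
    · exfalso
      rcases hend with h1 | h2
      · omega
      · exact h2 (hje ▸ h.2)
    · exact ih (by omega) (fun k hk1 hk2 => hall k (by omega) hk2)
  | case2 j h =>
    intro hj hall
    by_cases hje : j + 1 < e
    · exact absurd ⟨by omega, hall (j+1) (by omega) hje⟩ h
    · omega

-- what A's outer loop does across one maximal run [s0, e)
theorem outerA_run (states : List Int) (mp : Int) (e : Nat) (p : Int)
    (he : e ≤ states.length)
    (hend : e = states.length ∨ states.getD e 0 ≠ p)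
    (s0 : Nat) (hlt : s0 < e)
    (hall : ∀ k, s0 ≤ k → k < e → states.getD k 0 = p) :
    outerA states mp s0 =
      if p ≠ 0 ∧ mp ≤ (e : Int) - (s0 : Int) then some ((s0 : Int), (e : Int) - 1, p)
      else outerA states mp e := by
  have hs0len : s0 < states.length := Nat.lt_of_lt_of_le hlt he
  have hp : states.getD s0 0 = p := hall s0 le_rfl hlt
  rw [outerA, dif_pos hs0len]
  simp only [hp]
  by_cases hp0 : p = 0
  · rw [if_pos hp0, if_neg (by simp [hp0])]
    by_cases hse : s0 + 1 = e
    · rw [hse]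
    · rw [outerA_run states mp e p he hend (s0+1) (by omega)
        (fun k hk1 hk2 => hall k (by omega) hk2)]
      rw [if_neg (by simp [hp0])]
  · rw [if_neg hp0]
    have hre : runEndA states p s0 = e - 1 :=
      runEndA_eq states p e he hend s0 hlt (fun k hk1 hk2 => hall k (by omega) hk2)
    rw [hre]
    have hcast : ((e - 1 : Nat) : Int) = (e : Int) - 1 := by omega
    rw [hcast]
    have hcond : (mp ≤ (e : Int) - 1 - (s0 : Int) + 1) ↔ (p ≠ 0 ∧ mp ≤ (e : Int) - (s0 : Int)) := by
      constructor
      · intro h; exact ⟨hp0, by omega⟩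
      · intro h; omega
    by_cases hc : mp ≤ (e : Int) - 1 - (s0 : Int) + 1
    · rw [if_pos hc, if_pos (hcond.mp hc)]
    · rw [if_neg hc, if_neg (fun hx => hc (hcond.mpr hx))]
      have : e - 1 + 1 = e := by omega
      rw [this]
termination_by e - s0

-- main invariant: B mid-run at index idx (run started at s0) computes what A computes from s0
theorem goB_eq_outerA (states : List Int) (mp : Int) :
    ∀ n idx s0 p, states.length - idx < n → s0 < idx → idx ≤ states.length →
    (∀ k, s0 ≤ k → k < idx → states.getD k 0 = p) →
    goB states mp idx (some p) (s0 : Int) ((idx : Int) - (s0 : Int)) = outerA states mp s0 := by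
  intro n
  induction n with
  | zero => intro idx s0 p hn; omega
  | succ n ih =>
    intro idx s0 p hn hs0 hT hall
    rw [goB]
    by_cases hidx : idx < states.length
    · rw [dif_pos hidx]
      by_cases hpv : p = states.getD idx 0
      · rw [if_pos (by rw [hpv])]
        have harith : (idx : Int) - (s0 : Int) + 1 = ((idx + 1 : Nat) : Int) - (s0 : Int) := by
          push_cast; ring
        rw [harith]
        exact ih (idx + 1) s0 p (by omega) (by omega) (by omega)
          (fun k hk1 hk2 => by
            by_cases hk : k = idx
            · rw [hk]; exact hpv.symm
            · exact hall k hk1 (by omega))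
      · rw [if_neg (fun hx => hpv (Option.some.inj hx))]
        have hrun : outerA states mp s0 =
            if p ≠ 0 ∧ mp ≤ (idx : Int) - (s0 : Int) then some ((s0 : Int), (idx : Int) - 1, p)
            else outerA states mp idx :=
          outerA_run states mp idx p (le_of_lt hidx)
            (Or.inr (fun hx => hpv hx.symm)) s0 hs0 hall
        rw [hrun]
        simp only [flushB]
        by_cases hc : p ≠ 0 ∧ mp ≤ (idx : Int) - (s0 : Int)
        · rw [if_pos hc, if_pos hc]
          have : (s0 : Int) + ((idx : Int) - (s0 : Int)) - 1 = (idx : Int) - 1 := by ring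
          rw [this]
        · rw [if_neg hc, if_neg hc]
          have h1 : ((idx : Int)) = ((idx + 1 : Nat) : Int) - 1 := by push_cast; ring
          have := ih (idx + 1) idx (states.getD idx 0) (by omega) (by omega) (by omega)
            (fun k hk1 hk2 => by have : k = idx := by omega
                                 rw [this])
          simpa using this
    · rw [dif_neg hidx]
      have hie : idx = states.length := by omega
      have hrun : outerA states mp s0 =
          if p ≠ 0 ∧ mp ≤ (idx : Int) - (s0 : Int) then some ((s0 : Int), (idx : Int) - 1, p)
          else outerA states mp idx :=
        hie ▸ outerA_run states mp states.length p le_rfl (Or.inl rfl) s0 (by omega) (hie ▸ hall)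
      rw [hrun]
      simp only [flushB]
      by_cases hc : p ≠ 0 ∧ mp ≤ (idx : Int) - (s0 : Int)
      · rw [if_pos hc, if_pos hc]
        have : (s0 : Int) + ((idx : Int) - (s0 : Int)) - 1 = (idx : Int) - 1 := by ring
        rw [this]
      · rw [if_neg hc, if_neg hc, outerA, dif_neg (by omega)]

-- ===== VERDICT (by name: the statement is the Claim_ definition above) =====
theorem first_offframe_run_spec : Claim_equal_first_offframe_run := by
  intro states mp _
  unfold Spec_first_offframe_run first_offframe_run first_offframe_run_alt
  rw [goB]
  by_cases h0 : 0 < states.length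
  · rw [dif_pos h0, if_neg (by simp)]
    simp only [flushB]
    have := goB_eq_outerA states mp (states.length + 1) 1 0 (states.getD 0 0)
      (by omega) (by omega) (by omega)
      (fun k hk1 hk2 => by have : k = 0 := by omega
                           rw [this])
    simpa using this.symm
  · rw [dif_neg h0, outerA, dif_neg h0]
    simp [flushB]
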